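-- pv_equiv track=rewrite | github.com/austinstankowski/Intro-Ciphers | gronsfeldCipher.py | gronsfeldEncrypt
-- ===== SOURCE A (Python) =====
-- letterBase = ['A', 'B', 'C', 'D', 'E', 'F', 'G', 'H', 'I', 'J', 'K', 'L', 'M', 'N', 'O', 'P', 'Q', 'R', 'S', 'T', 'U', 'V', 'W', 'X', 'Y', 'Z']
--
-- def extendKey(message, key):
--     fullKey = [] #Key Repeated for Length of Message
--     keyIndex = 0 #Track Position in Key
--
--     for char in message: #Iterate Through Message
--         if char.upper() in letterBase:
--             fullKey.append(key[keyIndex % len(key)])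
--             keyIndex += 1
--         else:
--             fullKey.append(char)
--     return "".join(fullKey)
--
-- def gronsfeldEncrypt(message, key):
--     message = message.upper()
--     key = extendKey(message, key) #Grab Full Length Key
--     encryptedText = []
--
--     #Iterate Through Message
--     for i in range(len(message)):
--         if message[i] in letterBase: #If Iterated Character is a Letter
--             shift = int(key[i])
--
--             newIndex = (letterBase.index(message[i]) + shift) % 26
--             encryptedText.append(letterBase[newIndex])
--         else:
--             encryptedText.append(message[i])
--     return "".join(encryptedText)
-- ===== SOURCE B (Python) =====
-- letterBase = ['A', 'B', 'C', 'D', 'E', 'F', 'G', 'H', 'I', 'J', 'K', 'L', 'M', 'N', 'O', 'P', 'Q', 'R', 'S', 'T', 'U', 'V', 'W', 'X', 'Y', 'Z']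
--
-- def gronsfeldEncrypt(message, key):
--     encryptedText = []
--     keyIndex = 0
--     for ch in message.upper():
--         if ch in letterBase:
--             shift = int(key[keyIndex % len(key)])
--             encryptedText.append(letterBase[(letterBase.index(ch) + shift) % 26])
--             keyIndex += 1
--         else:
--             encryptedText.append(ch)
--     return "".join(encryptedText)
-- ===== Notes on version B (the rewrite author's own statement) =====
-- stated objective: simpler
-- what changed: B drops the extendKey helper and its intermediate full-length key string and the index-based second pass: it encrypts in a single char-by-char pass over the uppercased message, tracking the key position with a counter that advances only on letters.
import Mathlib
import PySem

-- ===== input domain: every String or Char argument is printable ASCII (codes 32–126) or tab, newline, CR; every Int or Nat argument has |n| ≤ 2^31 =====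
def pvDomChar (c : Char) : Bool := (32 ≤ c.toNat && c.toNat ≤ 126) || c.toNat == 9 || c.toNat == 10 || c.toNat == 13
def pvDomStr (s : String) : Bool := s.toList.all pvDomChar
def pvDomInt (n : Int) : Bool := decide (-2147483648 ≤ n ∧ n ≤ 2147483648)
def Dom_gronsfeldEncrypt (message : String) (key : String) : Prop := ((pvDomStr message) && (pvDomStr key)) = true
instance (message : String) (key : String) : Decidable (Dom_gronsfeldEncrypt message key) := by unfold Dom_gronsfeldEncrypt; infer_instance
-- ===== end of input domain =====

-- B replaces A's two-pass extendKey-then-index scheme by a single pass with a key-position counter (simpler decomposition, same cost).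


-- ===== PORT A =====
def letterBase : List Char := ['A', 'B', 'C', 'D', 'E', 'F', 'G', 'H', 'I', 'J', 'K', 'L', 'M', 'N', 'O', 'P', 'Q', 'R', 'S', 'T', 'U', 'V', 'W', 'X', 'Y', 'Z']

-- key[keyIndex % len(key)]: getD with a default is exact whenever key ≠ "" (key = "" with a letter
-- present is Python's ZeroDivisionError, excluded by Pre_).
def extendKey (message : String) (key : String) : String :=
  let st := message.toList.foldl
    (fun (st : List Char × Nat) ch =>
      if PySem.Chars.upperChar ch ∈ letterBase then
        (st.1 ++ [key.toList.getD (st.2 % key.toList.length) ' '], st.2 + 1)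
      else
        (st.1 ++ [ch], st.2))
    ([], 0)
  String.ofList st.1

-- int(key[i]): (PySem.Int.ofChars? [c]).getD 0 — exact where int() succeeds; the ValueError case
-- (a non-digit key character reached by a letter) is excluded by Pre_.
def gronsfeldEncrypt (message : String) (key : String) : String :=
  let ms := PySem.Str.upper message
  let fk := extendKey ms key
  let enc := (PySem.List.pyRange 0 (ms.toList.length) 1).foldl
    (fun (acc : List Char) i =>
      if PySem.List.pyGetD ms.toList i ' ' ∈ letterBase then
        acc ++ [PySem.List.pyGetD letterBase
          (PySem.Int.mod ((((PySem.List.index? letterBase (PySem.List.pyGetD ms.toList i ' ')).getD 0 : Nat) : Int)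
            + (PySem.Int.ofChars? [PySem.List.pyGetD fk.toList i ' ']).getD 0) 26) ' ']
      else
        acc ++ [PySem.List.pyGetD ms.toList i ' '])
    []
  String.ofList enc

-- ===== PORT B =====
def gronsfeldEncrypt_alt (message : String) (key : String) : String :=
  let kl := key.toList
  let st := (PySem.Str.upper message).toList.foldl
    (fun (st : List Char × Nat) ch =>
      if ch ∈ letterBase then
        (st.1 ++ [PySem.List.pyGetD letterBase
          (PySem.Int.mod ((((PySem.List.index? letterBase ch).getD 0 : Nat) : Int)
            + (PySem.Int.ofChars? [kl.getD (st.2 % kl.length) ' ']).getD 0) 26) ' '], st.2 + 1)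
      else
        (st.1 ++ [ch], st.2))
    ([], 0)
  String.ofList st.1

-- ===== PRECONDITION & SPEC =====
-- Pre_ excludes exactly the inputs where the Python A raises: a letter is present while the key is
-- empty (ZeroDivisionError) or one of the key characters the letters reach is not a digit (ValueError).
def Pre_gronsfeldEncrypt (message : String) (key : String) : Prop :=
  (message.toList.filter (fun c => PySem.Chars.upperChar c ∈ letterBase)).length = 0 ∨
  (key ≠ "" ∧ ((key.toList.take ((message.toList.filter (fun c => PySem.Chars.upperChar c ∈ letterBase)).length)).all PySem.Chars.isdigit) = true)
instance (message : String) (key : String) : Decidable (Pre_gronsfeldEncrypt message key) := by unfold Pre_gronsfeldEncrypt; infer_instance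

def pvWitness_gronsfeldEncrypt : String × String := ("Attack at dawn!", "2023")

def Spec_gronsfeldEncrypt (message : String) (key : String) (out : String) : Prop := out = gronsfeldEncrypt_alt message key
instance (message : String) (key : String) (out : String) : Decidable (Spec_gronsfeldEncrypt message key out) := by unfold Spec_gronsfeldEncrypt; infer_instance

-- ===== CLAIM (what is proved, stated in full; the proofs are below) =====
def Claim_equal_gronsfeldEncrypt : Prop := ∀ (message : String) (key : String), Dom_gronsfeldEncrypt message key → Pre_gronsfeldEncrypt message key → Spec_gronsfeldEncrypt message key (gronsfeldEncrypt message key)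

-- ===== LEMMAS AND PROOFS =====

-- one encrypted letter, with the key counter at k (the value both ports compute for a letter)
def encChar (kl : List Char) (k : Nat) (c : Char) : Char :=
  PySem.List.pyGetD letterBase
    (PySem.Int.mod ((((PySem.List.index? letterBase c).getD 0 : Nat) : Int)
      + (PySem.Int.ofChars? [kl.getD (k % kl.length) ' ']).getD 0) 26) ' '

-- reference recursion: encrypt cs with the key counter starting at k
def encRec (kl : List Char) : List Char → Nat → List Char
  | [], _ => []
  | c :: cs, k => if c ∈ letterBase then encChar kl k c :: encRec kl cs (k + 1) else c :: encRec kl cs k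

-- reference recursion for the content of A's extendKey output
def fkRec (kl : List Char) : List Char → Nat → List Char
  | [], _ => []
  | c :: cs, k =>
    if PySem.Chars.upperChar c ∈ letterBase then kl.getD (k % kl.length) ' ' :: fkRec kl cs (k + 1)
    else c :: fkRec kl cs k

theorem charLe (c d : Char) : c ≤ d ↔ c.toNat ≤ d.toNat := ge_iff_le

theorem upperChar_idem (c : Char) : PySem.Chars.upperChar (PySem.Chars.upperChar c) = PySem.Chars.upperChar c := by
  simp only [PySem.Chars.upperChar, PySem.Chars.islower, Bool.and_eq_true, decide_eq_true_eq, charLe] at *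
  split_ifs with h h2
  · exfalso
    obtain ⟨h1, h3⟩ := h
    have h97 : ('a' : Char).toNat = 97 := by decide
    have h122 : ('z' : Char).toNat = 122 := by decide
    have hv : (Char.ofNat (c.toNat - 32)).toNat = c.toNat - 32 := by
      rw [Char.toNat_ofNat, if_pos]
      constructor; omega
    obtain ⟨ha, hb⟩ := h2
    rw [hv] at ha
    omega
  · rfl
  · rfl

theorem extendKey_foldl (kl : List Char) (cs : List Char) (acc : List Char) (k : Nat) :
    cs.foldl
      (fun (st : List Char × Nat) ch =>
        if PySem.Chars.upperChar ch ∈ letterBase then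
          (st.1 ++ [kl.getD (st.2 % kl.length) ' '], st.2 + 1)
        else
          (st.1 ++ [ch], st.2))
      (acc, k)
    = (acc ++ fkRec kl cs k, k + (cs.filter (fun c => PySem.Chars.upperChar c ∈ letterBase)).length) := by
  induction cs generalizing acc k with
  | nil => simp [fkRec]
  | cons c cs ih =>
    by_cases h : PySem.Chars.upperChar c ∈ letterBase
    · simp only [List.foldl_cons, ih, fkRec, List.filter_cons, h]
      simp [List.append_assoc]
      omega
    · simp only [List.foldl_cons, ih, fkRec, List.filter_cons, h]
      simp [List.append_assoc]

theorem alt_foldl (kl : List Char) (cs : List Char) (acc : List Char) (k : Nat) :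
    cs.foldl
      (fun (st : List Char × Nat) ch =>
        if ch ∈ letterBase then
          (st.1 ++ [PySem.List.pyGetD letterBase
            (PySem.Int.mod ((((PySem.List.index? letterBase ch).getD 0 : Nat) : Int)
              + (PySem.Int.ofChars? [kl.getD (st.2 % kl.length) ' ']).getD 0) 26) ' '], st.2 + 1)
        else
          (st.1 ++ [ch], st.2))
      (acc, k)
    = (acc ++ encRec kl cs k, k + (cs.filter (fun c => c ∈ letterBase)).length) := by
  induction cs generalizing acc k with
  | nil => simp [encRec]
  | cons c cs ih =>
    by_cases h : c ∈ letterBase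
    · simp only [List.foldl_cons, ih, encRec, List.filter_cons, h]
      simp [encChar, List.append_assoc]
      omega
    · simp only [List.foldl_cons, ih, encRec, List.filter_cons, h]
      simp [List.append_assoc]

-- A's index-based second pass over (message, fkRec) fuses into encRec, on a message fixed by upper()
theorem zip_fkRec_eq_encRec (kl : List Char) (cs : List Char) (k : Nat)
    (hfix : ∀ c ∈ cs, PySem.Chars.upperChar c = c) :
    (List.range cs.length).map (fun i =>
      if cs.getD i ' ' ∈ letterBase then
        PySem.List.pyGetD letterBase
          (PySem.Int.mod ((((PySem.List.index? letterBase (cs.getD i ' ')).getD 0 : Nat) : Int)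
            + (PySem.Int.ofChars? [(fkRec kl cs k).getD i ' ']).getD 0) 26) ' '
      else cs.getD i ' ')
    = encRec kl cs k := by
  induction cs generalizing k with
  | nil => rfl
  | cons c cs ih =>
    have hc : PySem.Chars.upperChar c = c := hfix c (by simp)
    have htail : ∀ x ∈ cs, PySem.Chars.upperChar x = x := fun x hx => hfix x (by simp [hx])
    have hfk : fkRec kl (c :: cs) k
        = if c ∈ letterBase then kl.getD (k % kl.length) ' ' :: fkRec kl cs (k + 1)
          else c :: fkRec kl cs k := by
      rw [fkRec, hc]
    rw [hfk]
    show List.map _ (List.range (cs.length + 1)) = _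
    rw [List.range_succ_eq_map, List.map_cons, List.map_map]
    by_cases h : c ∈ letterBase
    · rw [if_pos h]
      simp only [encRec, if_pos h]
      refine congrArg₂ _ ?_ ?_
      · simp [h, encChar]
      · rw [← ih (k + 1) htail]
        apply List.map_congr_left
        intro i _
        simp
    · rw [if_neg h]
      simp only [encRec, if_neg h]
      refine congrArg₂ _ ?_ ?_
      · simp [h]
      · rw [← ih k htail]
        apply List.map_congr_left
        intro i _
        simp

theorem foldl_if_append {α β : Type} (l : List α) (P : α → Prop) [DecidablePred P]
    (f g : α → β) (acc : List β) :
    l.foldl (fun acc x => if P x then acc ++ [f x] else acc ++ [g x]) acc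
      = acc ++ l.map (fun x => if P x then f x else g x) := by
  induction l generalizing acc with
  | nil => simp
  | cons x l ih =>
    by_cases h : P x
    · simp only [List.foldl_cons, if_pos h, ih, List.map_cons, List.append_assoc, List.cons_append,
        List.nil_append]
    · simp only [List.foldl_cons, if_neg h, ih, List.map_cons, List.append_assoc, List.cons_append,
        List.nil_append]

theorem upper_fix (s : String) : ∀ c ∈ (PySem.Str.upper s).toList, PySem.Chars.upperChar c = c := by
  intro c hc
  rw [PySem.Str.toList_upper, PySem.Chars.upper] at hc
  obtain ⟨x, _, rfl⟩ := List.mem_map.mp hc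
  exact upperChar_idem x

-- ===== VERDICT (by name: the statement is the Claim_ definition above) =====
theorem gronsfeldEncrypt_spec : Claim_equal_gronsfeldEncrypt := by
  intro message key _ _
  unfold Spec_gronsfeldEncrypt gronsfeldEncrypt gronsfeldEncrypt_alt extendKey
  simp only []
  rw [alt_foldl, extendKey_foldl]
  simp only [String.toList_ofList]
  rw [PySem.List.pyRange_zero_natCast]
  rw [List.foldl_map]
  rw [foldl_if_append]
  simp only [PySem.List.pyGetD_natCast, List.nil_append]
  congr 1
  rw [← zip_fkRec_eq_encRec key.toList (PySem.Str.upper message).toList 0 (upper_fix message)]
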